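-- pv_equiv track=rewrite | github.com/ds-sec162/xssforge | xssforge/context.py | _count_unescaped
-- ===== SOURCE A (Python) =====
-- def _count_unescaped(text: str, char: str) -> int:
--     """Count unescaped occurrences of a character."""
--     count = 0
--     i = 0
--     while i < len(text):
--         if text[i] == char:
--             # Check if escaped
--             num_backslashes = 0
--             j = i - 1
--             while j >= 0 and text[j] == '\\':
--                 num_backslashes += 1
--                 j -= 1
--             if num_backslashes % 2 == 0:
--                 count += 1
--         i += 1
--     return count
-- ===== SOURCE B (Python) =====
-- def _count_unescaped(text: str, char: str) -> int:
--     """Count unescaped occurrences of a character (single pass, O(n))."""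
--     count = 0
--     bs = 0  # length of the current run of backslashes just before this char
--     for c in text:
--         if c == char and bs % 2 == 0:
--             count += 1
--         if c == '\\':
--             bs += 1
--         else:
--             bs = 0
--     return count
-- ===== Notes on version B (the rewrite author's own statement) =====
-- stated objective: faster
-- what changed: Replaces A's per-match backward rescan of the preceding backslash run with a single forward pass that maintains the length of the current backslash run, so the inner while loop disappears.
import Mathlib
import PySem

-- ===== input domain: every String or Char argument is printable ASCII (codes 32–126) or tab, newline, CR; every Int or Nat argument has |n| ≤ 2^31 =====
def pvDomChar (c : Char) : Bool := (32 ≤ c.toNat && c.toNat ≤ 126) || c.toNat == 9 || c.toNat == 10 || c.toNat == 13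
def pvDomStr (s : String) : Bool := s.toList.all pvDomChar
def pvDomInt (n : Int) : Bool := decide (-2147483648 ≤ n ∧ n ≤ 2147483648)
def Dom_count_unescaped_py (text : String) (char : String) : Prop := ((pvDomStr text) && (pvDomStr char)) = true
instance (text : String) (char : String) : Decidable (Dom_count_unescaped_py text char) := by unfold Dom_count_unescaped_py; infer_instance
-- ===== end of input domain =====

-- B replaces A's per-match backward rescan of the backslash run with one forward
-- pass maintaining the current run length (objective: faster, O(n) vs O(n^2)).

-- ===== PORT A =====
-- inner while loop: j walks left while text[j] == '\\'
def pvInnerA (l : List Char) (j : Int) (acc : Int) : Int :=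
  if h : 0 ≤ j ∧ PySem.List.pyGet? l j = some '\\' then pvInnerA l (j - 1) (acc + 1) else acc
termination_by (j + 1).toNat
decreasing_by omega

-- outer while loop over i
def pvOuterA (l : List Char) (char : String) (i : Nat) (count : Int) : Int :=
  if h : i < l.length then
    pvOuterA l char (i + 1)
      (if String.ofList [l[i]] = char then
         (if PySem.Int.mod (pvInnerA l ((i : Int) - 1) 0) 2 = 0 then count + 1 else count)
       else count)
  else count
termination_by l.length - i

def count_unescaped_py (text : String) (char : String) : Int :=
  pvOuterA text.toList char 0 0

-- ===== PORT B =====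
def pvStepB (char : String) (st : Int × Int) (c : Char) : Int × Int :=
  ((if String.ofList [c] = char ∧ PySem.Int.mod st.2 2 = 0 then st.1 + 1 else st.1),
   (if c = '\\' then st.2 + 1 else 0))

def count_unescaped_py_alt (text : String) (char : String) : Int :=
  (text.toList.foldl (pvStepB char) (0, 0)).1

-- ===== PRECONDITION & SPEC =====
def Spec_count_unescaped_py (text : String) (char : String) (out : Int) : Prop := out = count_unescaped_py_alt text char
instance (text : String) (char : String) (out : Int) : Decidable (Spec_count_unescaped_py text char out) := by unfold Spec_count_unescaped_py; infer_instance

-- ===== CLAIM (what is proved, stated in full; the proofs are below) =====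
def Claim_equal_count_unescaped_py : Prop := ∀ (text : String) (char : String), Dom_count_unescaped_py text char → Spec_count_unescaped_py text char (count_unescaped_py text char)

-- ===== LEMMAS AND PROOFS =====

-- length of the trailing backslash run of a list
def pvTB (p : List Char) : Int := ((p.reverse.takeWhile (· = '\\')).length : Int)

theorem pvTB_append (p : List Char) (c : Char) :
    pvTB (p ++ [c]) = if c = '\\' then pvTB p + 1 else 0 := by
  simp only [pvTB, List.reverse_append, List.reverse_singleton, List.singleton_append,
    List.takeWhile]
  by_cases hc : c = '\\' <;> simp [hc]

theorem pvInnerA_eq (l : List Char) (i : Nat) (hi : i ≤ l.length) (acc : Int) :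
    pvInnerA l ((i : Int) - 1) acc = acc + pvTB (l.take i) := by
  induction i generalizing acc with
  | zero =>
    rw [pvInnerA]
    simp [pvTB]
  | succ k ih =>
    have hk : k < l.length := by omega
    have hcast : (((k + 1 : Nat)) : Int) - 1 = (k : Int) := by push_cast; ring
    have hget : PySem.List.pyGet? l ((k : Nat) : Int) = some l[k] := by
      rw [PySem.List.pyGet?_natCast]
      simp [List.getElem?_eq_getElem hk]
    have htake : l.take (k + 1) = l.take k ++ [l[k]] := by
      rw [List.take_add_one]
      simp [List.getElem?_eq_getElem hk]
    rw [pvInnerA, hcast]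
    by_cases hb : l[k] = '\\'
    · rw [dif_pos ⟨by positivity, by rw [hget, hb]⟩]
      rw [ih (by omega) (acc + 1), htake, pvTB_append, if_pos hb]
      ring
    · rw [dif_neg (by
        intro hcon
        rw [hget] at hcon
        exact hb (by simpa using hcon.2))]
      rw [htake, pvTB_append, if_neg hb]
      ring

theorem pvMain (char : String) (s p : List Char) (count : Int) :
    pvOuterA (p ++ s) char p.length count = (s.foldl (pvStepB char) (count, pvTB p)).1 := by
  induction s generalizing p count with
  | nil =>
    rw [pvOuterA]
    simp
  | cons c s' ih =>
    rw [pvOuterA]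
    have hlt : p.length < (p ++ c :: s').length := by simp
    rw [dif_pos hlt]
    have hget : (p ++ c :: s')[p.length]'hlt = c := by simp
    have hinner : pvInnerA (p ++ c :: s') ((p.length : Int) - 1) 0 = pvTB p := by
      rw [pvInnerA_eq _ p.length (by simp) 0, List.take_left]
      ring
    rw [hget, hinner, List.foldl_cons]
    have hstep : pvStepB char (count, pvTB p) c =
        ((if String.ofList [c] = char then
            (if PySem.Int.mod (pvTB p) 2 = 0 then count + 1 else count) else count),
         pvTB (p ++ [c])) := by
      simp only [pvStepB, pvTB_append]
      by_cases h1 : String.ofList [c] = char <;>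
        by_cases h2 : PySem.Int.mod (pvTB p) 2 = 0 <;> simp [h1]
    rw [hstep]
    have hassoc : p ++ c :: s' = (p ++ [c]) ++ s' := by simp
    have hlen : p.length + 1 = (p ++ [c]).length := by simp
    rw [hassoc, hlen]
    exact ih (p ++ [c]) _

-- ===== VERDICT (by name: the statement is the Claim_ definition above) =====
theorem count_unescaped_py_spec : Claim_equal_count_unescaped_py := by
  intro text char _
  unfold Spec_count_unescaped_py count_unescaped_py count_unescaped_py_alt
  have := pvMain char text.toList [] 0
  simpa [pvTB] using this
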